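-- pv_equiv track=rewrite | github.com/plugtheo/idlepods_ai | experience/app/routes/record.py | _infer_capability
-- ===== SOURCE A (Python) =====
-- def _infer_capability(agent_chain: list[str]) -> str:
--     """Map the dominant agent in the chain to a capability label string."""
--     # Priority order: first matching agent wins.
--     # Returns capability labels (e.g. "coding") not role names (e.g. "coder")
--     # so the Training Service receives the expected format without substring hacks.
--     priority = [
--         ("coder",      "coding"),
--         ("debugger",   "debugging"),
--         ("researcher", "research"),
--         ("planner",    "planning"),
--         ("reviewer",   "review"),
--         ("critic",     "criticism"),
--     ]
--     for role, capability in priority: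
--         if role in agent_chain:
--             return capability
--     return "general"
-- ===== SOURCE B (Python) =====
-- def _infer_capability(agent_chain: list[str]) -> str:
--     """Map the dominant agent in the chain to a capability label string."""
--     table = {
--         "coder":      (0, "coding"),
--         "debugger":   (1, "debugging"),
--         "researcher": (2, "research"),
--         "planner":    (3, "planning"),
--         "reviewer":   (4, "review"),
--         "critic":     (5, "criticism"),
--     }
--     best = None
--     for agent in agent_chain:
--         entry = table.get(agent)
--         if entry is not None and (best is None or entry[0] < best[0]):
--             best = entry
--     return best[1] if best is not None else "general"
-- ===== Notes on version B (the rewrite author's own statement) =====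
-- stated objective: idiomatic
-- what changed: B builds a role->(rank,capability) dict once and makes a single pass over the input chain tracking the minimum-rank match, instead of scanning the chain once per priority-table entry.
import Mathlib
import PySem

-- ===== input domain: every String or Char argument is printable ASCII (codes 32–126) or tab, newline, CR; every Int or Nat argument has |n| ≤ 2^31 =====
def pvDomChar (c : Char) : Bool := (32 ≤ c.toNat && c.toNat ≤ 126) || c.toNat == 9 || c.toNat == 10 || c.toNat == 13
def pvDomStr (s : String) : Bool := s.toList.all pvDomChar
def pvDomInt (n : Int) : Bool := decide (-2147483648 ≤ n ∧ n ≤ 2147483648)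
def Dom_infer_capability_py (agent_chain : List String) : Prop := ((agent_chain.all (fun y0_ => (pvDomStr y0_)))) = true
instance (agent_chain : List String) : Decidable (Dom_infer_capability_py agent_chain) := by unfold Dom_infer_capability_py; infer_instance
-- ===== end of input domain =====

-- B replaces A's scan-of-the-chain-per-priority-row loop with one pass over the input chain,
-- looking each agent up in a role->(rank,capability) dict and tracking the minimum-rank match (idiomatic).

-- ===== PORT A =====
def infer_capability_py_priority : List (String × String) :=
  [("coder", "coding"), ("debugger", "debugging"), ("researcher", "research"),
   ("planner", "planning"), ("reviewer", "review"), ("critic", "criticism")]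

def infer_capability_py_loop (agent_chain : List String) : List (String × String) → String
  | [] => "general"
  | (role, capability) :: rest =>
      if role ∈ agent_chain then capability
      else infer_capability_py_loop agent_chain rest

def infer_capability_py (agent_chain : List String) : String :=
  infer_capability_py_loop agent_chain infer_capability_py_priority

-- ===== PORT B =====
def infer_capability_py_table : PySem.Dict String (Int × String) :=
  PySem.Dict.ofList
    [("coder", (0, "coding")), ("debugger", (1, "debugging")), ("researcher", (2, "research")),
     ("planner", (3, "planning")), ("reviewer", (4, "review")), ("critic", (5, "criticism"))]

-- one iteration of B's loop body: dict lookup, keep the lower-rank entry (first-seen wins ties)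
def infer_capability_py_step (best : Option (Int × String)) (agent : String) : Option (Int × String) :=
  match PySem.Dict.get? infer_capability_py_table agent with
  | none => best
  | some entry =>
      match best with
      | none => some entry
      | some b => if entry.1 < b.1 then some entry else some b

def infer_capability_py_alt (agent_chain : List String) : String :=
  match agent_chain.foldl infer_capability_py_step none with
  | some b => b.2
  | none => "general"

-- ===== PRECONDITION & SPEC =====
def Spec_infer_capability_py (agent_chain : List String) (out : String) : Prop := out = infer_capability_py_alt agent_chain
instance (agent_chain : List String) (out : String) : Decidable (Spec_infer_capability_py agent_chain out) := by unfold Spec_infer_capability_py; infer_instance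

-- ===== CLAIM (what is proved, stated in full; the proofs are below) =====
def Claim_equal_infer_capability_py : Prop := ∀ (agent_chain : List String), Dom_infer_capability_py agent_chain → Spec_infer_capability_py agent_chain (infer_capability_py agent_chain)

-- ===== LEMMAS AND PROOFS =====

-- the minimum-rank entry among the chain's recognised roles, characterised by membership
def pvBest (l : List String) : Option (Int × String) :=
  if "coder" ∈ l then some (0, "coding")
  else if "debugger" ∈ l then some (1, "debugging")
  else if "researcher" ∈ l then some (2, "research")
  else if "planner" ∈ l then some (3, "planning")
  else if "reviewer" ∈ l then some (4, "review")
  else if "critic" ∈ l then some (5, "criticism")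
  else none

-- left-biased minimum-rank combination of two optional entries
def pvMerge : Option (Int × String) → Option (Int × String) → Option (Int × String)
  | b, none => b
  | none, some e => some e
  | some b, some e => if e.1 < b.1 then some e else some b

theorem pvMerge_assoc (a b c : Option (Int × String)) :
    pvMerge (pvMerge a b) c = pvMerge a (pvMerge b c) := by
  cases a <;> cases b <;> cases c <;> simp only [pvMerge] <;>
    split_ifs <;> (try simp only [pvMerge]) <;> (try split_ifs) <;>
    first | rfl | (exfalso; omega)

theorem pvStep_eq (b : Option (Int × String)) (x : String) :
    infer_capability_py_step b x = pvMerge b (PySem.Dict.get? infer_capability_py_table x) := by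
  cases h : PySem.Dict.get? infer_capability_py_table x <;> cases b <;>
    simp [infer_capability_py_step, pvMerge, h]

theorem pvBest_cons (x : String) (l : List String) :
    pvBest (x :: l) = pvMerge (PySem.Dict.get? infer_capability_py_table x) (pvBest l) := by
  by_cases h1 : x = "coder"
  · subst h1
    rw [show PySem.Dict.get? infer_capability_py_table "coder" = some (0, "coding") from rfl]
    simp [pvBest, List.mem_cons]
    split_ifs <;> simp [pvMerge]
  · by_cases h2 : x = "debugger"
    · subst h2
      rw [show PySem.Dict.get? infer_capability_py_table "debugger" = some (1, "debugging") from rfl]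
      simp [pvBest, List.mem_cons]
      split_ifs <;> simp [pvMerge]
    · by_cases h3 : x = "researcher"
      · subst h3
        rw [show PySem.Dict.get? infer_capability_py_table "researcher" = some (2, "research") from rfl]
        simp [pvBest, List.mem_cons]
        split_ifs <;> simp [pvMerge]
      · by_cases h4 : x = "planner"
        · subst h4
          rw [show PySem.Dict.get? infer_capability_py_table "planner" = some (3, "planning") from rfl]
          simp [pvBest, List.mem_cons]
          split_ifs <;> simp [pvMerge]
        · by_cases h5 : x = "reviewer"
          · subst h5
            rw [show PySem.Dict.get? infer_capability_py_table "reviewer" = some (4, "review") from rfl]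
            simp [pvBest, List.mem_cons]
            split_ifs <;> simp [pvMerge]
          · by_cases h6 : x = "critic"
            · subst h6
              rw [show PySem.Dict.get? infer_capability_py_table "critic" = some (5, "criticism") from rfl]
              simp [pvBest, List.mem_cons]
              split_ifs <;> simp [pvMerge]
            · have hget : PySem.Dict.get? infer_capability_py_table x = none := by
                rw [show infer_capability_py_table = PySem.Dict.mk
                    [("coder", (0, "coding")), ("debugger", (1, "debugging")),
                     ("researcher", (2, "research")), ("planner", (3, "planning")),
                     ("reviewer", (4, "review")), ("critic", (5, "criticism"))] from rfl]
                simp [PySem.Dict.get?, beq_iff_eq, Ne.symm h1, Ne.symm h2, Ne.symm h3,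
                  Ne.symm h4, Ne.symm h5, Ne.symm h6]
              rw [hget]
              simp only [pvBest, List.mem_cons, Ne.symm h1, Ne.symm h2, Ne.symm h3,
                Ne.symm h4, Ne.symm h5, Ne.symm h6, false_or]
              split_ifs <;> rfl

theorem pvFold_eq (l : List String) :
    ∀ b : Option (Int × String), l.foldl infer_capability_py_step b = pvMerge b (pvBest l) := by
  induction l with
  | nil => intro b; simp [pvBest]; cases b <;> rfl
  | cons x l ih =>
      intro b
      rw [List.foldl_cons, ih, pvStep_eq, pvMerge_assoc, ← pvBest_cons]

-- ===== VERDICT (by name: the statement is the Claim_ definition above) =====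
theorem infer_capability_py_spec : Claim_equal_infer_capability_py := by
  intro agent_chain _
  unfold Spec_infer_capability_py infer_capability_py_alt
  rw [pvFold_eq agent_chain none]
  unfold infer_capability_py infer_capability_py_loop infer_capability_py_priority pvBest
  split_ifs <;> simp [infer_capability_py_loop, pvMerge, *]
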